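-- pv_equiv track=rewrite | github.com/Darshil-Solanki/LeetCode | contest/constructUniformParityArray.py | uniformArray
-- ===== SOURCE A (Python) =====
-- def uniformArray(nums1: list[int]) -> bool:
--     odd_count, even_count = 0, 0
--     for num in nums1:
--         if num%2:
--             odd_count += 1
--         else:
--             even_count += 1
--     if odd_count > 1:
--         return True
--     if even_count>=1 and odd_count>=1:
--         return True
--     if (odd_count == 0 and even_count) or (even_count ==0 and odd_count):
--         return True
--
--     return False
-- ===== SOURCE B (Python) =====
-- def uniformArray(nums1: list[int]) -> bool:
--     # Every nonempty list satisfies one of A's True branches, so the answer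
--     # is simply whether the list is nonempty.
--     return len(nums1) > 0
-- ===== Notes on version B (the rewrite author's own statement) =====
-- stated objective: faster
-- what changed: Replaced the parity-counting loop and branch chain by the closed form len(nums1) > 0, since every nonempty list hits a True branch.
import Mathlib
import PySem

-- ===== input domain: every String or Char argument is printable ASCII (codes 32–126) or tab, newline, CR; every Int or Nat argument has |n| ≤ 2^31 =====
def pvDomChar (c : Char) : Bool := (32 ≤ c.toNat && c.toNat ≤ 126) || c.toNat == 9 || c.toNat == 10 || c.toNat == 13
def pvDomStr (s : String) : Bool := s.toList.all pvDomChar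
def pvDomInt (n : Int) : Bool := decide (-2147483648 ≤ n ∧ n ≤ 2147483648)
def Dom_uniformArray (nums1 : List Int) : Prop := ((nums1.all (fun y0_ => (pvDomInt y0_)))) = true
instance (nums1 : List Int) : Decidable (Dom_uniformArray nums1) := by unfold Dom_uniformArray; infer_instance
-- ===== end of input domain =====

-- B replaces A's parity-counting loop and branch chain by the closed form `length > 0` (asymptotically faster).


-- ===== PORT A =====
def uniformArray (nums1 : List Int) : Bool :=
  let counts : Int × Int := nums1.foldl
    (fun (st : Int × Int) num =>
      if PySem.Int.mod num 2 ≠ 0 then (st.1 + 1, st.2) else (st.1, st.2 + 1))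
    (0, 0)
  let odd_count := counts.1
  let even_count := counts.2
  if odd_count > 1 then true
  else if even_count ≥ 1 ∧ odd_count ≥ 1 then true
  else if (odd_count = 0 ∧ even_count ≠ 0) ∨ (even_count = 0 ∧ odd_count ≠ 0) then true
  else false

-- ===== PORT B =====
def uniformArray_alt (nums1 : List Int) : Bool :=
  decide (nums1.length > 0)

-- ===== PRECONDITION & SPEC =====
def Spec_uniformArray (nums1 : List Int) (out : Bool) : Prop := out = uniformArray_alt nums1
instance (nums1 : List Int) (out : Bool) : Decidable (Spec_uniformArray nums1 out) := by unfold Spec_uniformArray; infer_instance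

-- ===== CLAIM (what is proved, stated in full; the proofs are below) =====
def Claim_equal_uniformArray : Prop := ∀ (nums1 : List Int), Dom_uniformArray nums1 → Spec_uniformArray nums1 (uniformArray nums1)

-- ===== LEMMAS AND PROOFS =====

-- After the fold, both counters stay ≥ the start and their sum grows by the list length.
theorem uniformArray_fold_inv (l : List Int) (st : Int × Int) :
    let r := l.foldl
      (fun (st : Int × Int) num =>
        if PySem.Int.mod num 2 ≠ 0 then (st.1 + 1, st.2) else (st.1, st.2 + 1)) st
    st.1 ≤ r.1 ∧ st.2 ≤ r.2 ∧ r.1 + r.2 = st.1 + st.2 + l.length := by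
  induction l generalizing st with
  | nil => simp
  | cons a t ih =>
    simp only [List.foldl_cons, List.length_cons]
    by_cases h : PySem.Int.mod a 2 ≠ 0
    · simp only [if_pos h]
      have := ih (st.1 + 1, st.2)
      simp at this ⊢
      omega
    · simp only [if_neg h]
      have := ih (st.1, st.2 + 1)
      simp at this ⊢
      omega

-- ===== VERDICT (by name: the statement is the Claim_ definition above) =====
theorem uniformArray_spec : Claim_equal_uniformArray := by
  intro nums1 _
  unfold Spec_uniformArray uniformArray uniformArray_alt
  have h := uniformArray_fold_inv nums1 (0, 0)
  simp only at h
  obtain ⟨h1, h2, h3⟩ := h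
  cases nums1 with
  | nil => decide
  | cons a t =>
    simp only [List.length_cons] at h3
    dsimp only
    split_ifs with c1 c2 c3
    · simp
    · simp
    · simp
    · exfalso
      push_neg at c1 c2 c3
      omega
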